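-- pv_equiv track=rewrite | github.com/leoagea/AdventOfCode | 2025/day2/part2.py | is_primitive_pattern
-- ===== SOURCE A (Python) =====
-- def is_primitive_pattern(x: int, k: int) -> bool:
-- 	s = str(x).zfill(k)
-- 	for sub_k in range(1, k):
-- 		if k % sub_k == 0:
-- 			pattern = s[:sub_k]
-- 			if pattern * (k // sub_k) == s:
-- 				return False
-- 	return True
-- ===== SOURCE B (Python) =====
-- def _prime_factors(m, d=2):
--     # distinct prime factors of m (m >= 1) by trial division
--     if d * d > m:
--         return [m] if m > 1 else []
--     if m % d == 0:
--         while m % d == 0: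
--             m //= d
--         return [d] + _prime_factors(m, d + 1)
--     return _prime_factors(m, d + 1)
--
-- def is_primitive_pattern(x: int, k: int) -> bool:
--     s = str(x).zfill(k)
--     if len(s) != k:
--         return True
--     return all(s[:k // p] * p != s for p in _prime_factors(k))
-- ===== Notes on version B (the rewrite author's own statement) =====
-- stated objective: faster
-- what changed: A tries every pattern length 1..k-1 and tests the divisor condition inside the loop; B instead factorises k by trial division and tests exactly one candidate pattern length k//p per distinct prime factor p (a string is a repeated pattern iff it is one for some prime cofactor), plus an O(1) length guard for the case str(x) is longer than k.
import Mathlib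
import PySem

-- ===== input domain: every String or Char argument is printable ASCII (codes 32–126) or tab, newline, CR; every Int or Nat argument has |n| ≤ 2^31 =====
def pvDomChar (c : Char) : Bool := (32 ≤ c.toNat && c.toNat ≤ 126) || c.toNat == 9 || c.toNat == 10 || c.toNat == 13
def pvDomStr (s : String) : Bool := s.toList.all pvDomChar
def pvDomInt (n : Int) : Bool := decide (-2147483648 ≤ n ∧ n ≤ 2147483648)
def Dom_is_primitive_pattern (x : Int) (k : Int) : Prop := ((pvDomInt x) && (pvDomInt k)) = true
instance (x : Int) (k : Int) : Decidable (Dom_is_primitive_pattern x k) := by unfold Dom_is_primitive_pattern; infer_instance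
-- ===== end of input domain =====

-- B replaces A's scan of every candidate length 1..k-1 by a trial-division factorisation of k,
-- testing only one pattern length k//p per distinct prime factor p (objective: alternative/faster loop structure).

-- ===== PORT A =====
-- the for-loop with early 'return False'; str slicing / 'pattern * m' / str equality are ported
-- on the code points (List Char) via PySem.List.slice / pyRepeat — exact for Python str
def pvLoopA (s : List Char) (k : Int) : List Int → Bool
  | [] => true
  | sub_k :: rest =>
    if PySem.Int.mod k sub_k = 0 then
      let pattern := PySem.List.slice s none (some sub_k)
      if PySem.List.pyRepeat pattern (PySem.Int.floordiv k sub_k) = s then false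
      else pvLoopA s k rest
    else pvLoopA s k rest

def is_primitive_pattern (x : Int) (k : Int) : Bool :=
  let s := PySem.Str.zfill (PySem.Int.toStr x) k
  pvLoopA s.toList k (PySem.List.pyRange 1 k)

-- ===== PORT B =====
-- 'while m % d == 0: m //= d' of Source B; the extra guard 2 ≤ d ∧ 1 ≤ m (true at every call site
-- reachable from is_primitive_pattern_alt) only makes the recursion total
def pvStrip (m d : Int) : Int :=
  if 2 ≤ d ∧ 1 ≤ m ∧ PySem.Int.mod m d = 0 then pvStrip (PySem.Int.floordiv m d) d else m
termination_by m.toNat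
decreasing_by
  rename_i h
  obtain ⟨hd, hm, hmod⟩ := h
  have h1 : PySem.Int.floordiv m d = m / d := by
    simp [PySem.Int.floordiv, Int.fdiv_eq_ediv, show (0:Int) ≤ d by omega]
  have h2 : m / d < m := by
    rw [Int.ediv_lt_iff_lt_mul (by omega)]; nlinarith
  have h3 : 0 ≤ m / d := Int.ediv_nonneg (by omega) (by omega)
  rw [h1]; omega

-- helper fact cited by pvFactor's decreasing_by
theorem pvStrip_le (m d : Int) : pvStrip m d ≤ m := by
  by_cases h : 2 ≤ d ∧ 1 ≤ m ∧ PySem.Int.mod m d = 0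
  · obtain ⟨hd, hm, hmod⟩ := h
    rw [pvStrip, if_pos ⟨hd, hm, hmod⟩]
    have h1 : PySem.Int.floordiv m d = m / d := by
      simp [PySem.Int.floordiv, Int.fdiv_eq_ediv, show (0:Int) ≤ d by omega]
    have := pvStrip_le (PySem.Int.floordiv m d) d
    have h2 : m / d < m := by
      rw [Int.ediv_lt_iff_lt_mul (by omega)]; nlinarith
    omega
  · rw [pvStrip, if_neg h]
termination_by m.toNat
decreasing_by
  have h1 : PySem.Int.floordiv m d = m / d := by
    simp [PySem.Int.floordiv, Int.fdiv_eq_ediv, show (0:Int) ≤ d by omega]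
  have h2 : m / d < m := by
    rw [Int.ediv_lt_iff_lt_mul (by omega)]; nlinarith
  have h3 : 0 ≤ m / d := Int.ediv_nonneg (by omega) (by omega)
  rw [h1]; omega

-- _prime_factors of Source B
def pvFactor (m d : Int) : List Int :=
  if d * d > m then (if m > 1 then [m] else [])
  else if PySem.Int.mod m d = 0 then d :: pvFactor (pvStrip m d) (d + 1)
  else pvFactor m (d + 1)
termination_by (m + 2 - d).toNat
decreasing_by
  · rename_i h _
    have hdm : d ≤ m := by nlinarith [mul_self_nonneg d, mul_self_nonneg (d - 1)]
    have := pvStrip_le m d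
    omega
  · rename_i h _
    have hdm : d ≤ m := by nlinarith [mul_self_nonneg d, mul_self_nonneg (d - 1)]
    omega

def is_primitive_pattern_alt (x : Int) (k : Int) : Bool :=
  let s := PySem.Str.zfill (PySem.Int.toStr x) k
  if PySem.Str.len s ≠ k then true
  else (pvFactor k 2).all
    (fun p => !(PySem.List.pyRepeat (PySem.List.slice s.toList none (some (PySem.Int.floordiv k p))) p = s.toList : Bool))

-- ===== PRECONDITION & SPEC =====
def Spec_is_primitive_pattern (x : Int) (k : Int) (out : Bool) : Prop := out = is_primitive_pattern_alt x k
instance (x : Int) (k : Int) (out : Bool) : Decidable (Spec_is_primitive_pattern x k out) := by unfold Spec_is_primitive_pattern; infer_instance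

-- ===== CLAIM (what is proved, stated in full; the proofs are below) =====
def Claim_equal_is_primitive_pattern : Prop := ∀ (x : Int) (k : Int), Dom_is_primitive_pattern x k → Spec_is_primitive_pattern x k (is_primitive_pattern x k)

-- ===== LEMMAS AND PROOFS =====
theorem pv_mod_pos (m d : Int) (hd : 0 < d) : PySem.Int.mod m d = m % d := by
  simp [PySem.Int.mod, Int.fmod_eq_emod, show (0:Int) ≤ d from hd.le]

theorem pv_fdiv_pos (m d : Int) (hd : 0 < d) : PySem.Int.floordiv m d = m / d := by
  simp [PySem.Int.floordiv, Int.fdiv_eq_ediv, show (0:Int) ≤ d from hd.le]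

theorem pv_mem_pyRange_one (a b i : Int) : i ∈ PySem.List.pyRange a b ↔ a ≤ i ∧ i < b := by
  induction h : (b - a).toNat generalizing a with
  | zero =>
    have hnil : PySem.List.pyRange a b = [] := by simp [PySem.List.pyRange, show b ≤ a by omega]
    rw [hnil]; simp; omega
  | succ n ih =>
    rw [PySem.List.pyRange_one_cons (by omega)]
    simp [List.mem_cons, ih (a + 1) (by omega)]
    omega

theorem pv_length_rep {α : Type} (w : List α) (m : Nat) :
    ((List.replicate m w).flatten).length = m * w.length := by
  simp [List.length_flatten, List.map_replicate, List.sum_replicate, smul_eq_mul]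

theorem pv_rep_rep {α : Type} (w : List α) (t u : Nat) :
    (List.replicate u ((List.replicate t w).flatten)).flatten = (List.replicate (t * u) w).flatten := by
  induction u with
  | zero => simp
  | succ u ih =>
    rw [List.replicate_succ, List.flatten_cons, ih, Nat.mul_succ, Nat.add_comm,
      List.replicate_add, List.flatten_append]

theorem pv_take_rep {α : Type} (w : List α) (t u : Nat) (hu : 1 ≤ u) :
    ((List.replicate (t * u) w).flatten).take (t * w.length) = (List.replicate t w).flatten := by
  obtain ⟨u', rfl⟩ : ∃ u', u = u' + 1 := ⟨u - 1, by omega⟩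
  rw [show t * (u' + 1) = t + t * u' by ring, List.replicate_add, List.flatten_append,
    List.take_left' (pv_length_rep w t)]

theorem pv_period_up {α : Type} (cs w : List α) (t u : Nat) (hu : 1 ≤ u)
    (h : cs = (List.replicate (t * u) w).flatten) :
    cs = (List.replicate u (cs.take (w.length * t))).flatten := by
  subst h
  rw [mul_comm w.length t, pv_take_rep w t u hu, pv_rep_rep]

theorem pv_elem_iff_nat (q : Nat) :
    (2 ≤ (q : Int) ∧ ∀ r : Int, 2 ≤ r → r < q → ¬ r ∣ (q : Int)) ↔ q.Prime := by
  rw [Nat.prime_def_lt']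
  constructor
  · rintro ⟨h2, hmin⟩
    refine ⟨by omega, fun m hm hmq hdvd => ?_⟩
    exact hmin m (by omega) (by omega) (Int.natCast_dvd_natCast.mpr hdvd)
  · rintro ⟨h2, hmin⟩
    refine ⟨by omega, fun r hr hrq hdvd => ?_⟩
    have h0 : r = ((r.toNat : Nat) : Int) := by omega
    have : r.toNat ∣ q := Int.natCast_dvd_natCast.mp (by rw [← h0]; exact hdvd)
    exact hmin r.toNat (by omega) (by omega) this

theorem pv_loopA_false_iff (s : List Char) (k : Int) (l : List Int) :
    pvLoopA s k l = false ↔ ∃ i ∈ l, PySem.Int.mod k i = 0 ∧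
      PySem.List.pyRepeat (PySem.List.slice s none (some i)) (PySem.Int.floordiv k i) = s := by
  induction l with
  | nil => simp [pvLoopA]
  | cons i rest ih =>
    simp only [pvLoopA]
    split_ifs with h1 h2
    · simp [h1, h2]
    · simp [ih, h1, h2]
    · simp [ih, h1]

theorem pvStrip_spec (m d : Int) (hd : 2 ≤ d) (hm : 1 ≤ m) :
    1 ≤ pvStrip m d ∧ (∃ j : Nat, m = d ^ j * pvStrip m d) ∧ ¬ d ∣ pvStrip m d := by
  by_cases h : PySem.Int.mod m d = 0
  · have hdvd : d ∣ m := Int.dvd_of_emod_eq_zero (by rw [← pv_mod_pos m d (by omega)]; exact h)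
    have hq1 : 1 ≤ m / d := by
      rcases hdvd with ⟨c, hc⟩
      have hc1 : 1 ≤ c := by nlinarith
      rw [hc, Int.mul_ediv_cancel_left _ (by omega : d ≠ 0)]; exact hc1
    have hfd : PySem.Int.floordiv m d = m / d := pv_fdiv_pos m d (by omega)
    have hrec := pvStrip_spec (PySem.Int.floordiv m d) d hd (by rw [hfd]; exact hq1)
    rw [pvStrip, if_pos ⟨hd, hm, h⟩]
    obtain ⟨hs1, ⟨j, hj⟩, hnd⟩ := hrec
    refine ⟨hs1, ⟨j + 1, ?_⟩, hnd⟩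
    have hmd : m = d * PySem.Int.floordiv m d := by
      rw [hfd]; exact (Int.mul_ediv_cancel' hdvd).symm
    rw [pow_succ]
    calc m = d * PySem.Int.floordiv m d := hmd
      _ = d * (d ^ j * pvStrip (PySem.Int.floordiv m d) d) := by rw [← hj]
      _ = d ^ j * d * pvStrip (PySem.Int.floordiv m d) d := by ring
  · have hguard : ¬(2 ≤ d ∧ 1 ≤ m ∧ PySem.Int.mod m d = 0) := fun hh => h hh.2.2
    rw [pvStrip, if_neg hguard]
    refine ⟨hm, ⟨0, by simp⟩, fun hdd => h ?_⟩
    rw [pv_mod_pos m d (by omega)]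
    exact Int.emod_eq_zero_of_dvd hdd
termination_by m.toNat
decreasing_by
  rw [hfd]
  have h2 : m / d < m := by
    rw [Int.ediv_lt_iff_lt_mul (by omega)]; nlinarith
  have h3 : 0 ≤ m / d := Int.ediv_nonneg (by omega) (by omega)
  omega

theorem pv_elem_prime (p : Int) (h2 : 2 ≤ p) (hmin : ∀ q, 2 ≤ q → q < p → ¬ q ∣ p) :
    Prime p := by
  have hnat : p.toNat.Prime := by
    rw [← pv_elem_iff_nat]
    refine ⟨by omega, fun r hr hrq hdvd => ?_⟩
    have hcast : ((p.toNat : Nat) : Int) = p := by omega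
    exact hmin r hr (by omega) (by rwa [hcast] at hdvd)
  rw [Int.prime_iff_natAbs_prime]
  have : p.natAbs = p.toNat := by omega
  rw [this]; exact hnat

theorem pvFactor_mem (m d : Int) : ∀ p, 1 ≤ m → 2 ≤ d →
    (∀ q, 2 ≤ q → q < d → ¬ q ∣ m) →
    (p ∈ pvFactor m d ↔ 2 ≤ p ∧ (∀ q, 2 ≤ q → q < p → ¬ q ∣ p) ∧ p ∣ m) := by
  intro p hm hd hinv
  by_cases hgt : d * d > m
  · rw [pvFactor, if_pos hgt]
    by_cases hm1 : m > 1
    · rw [if_pos hm1]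
      simp only [List.mem_singleton]
      constructor
      · rintro rfl
        refine ⟨by omega, fun q hq2 hqm hqdvd => ?_, dvd_refl _⟩
        rcases hqdvd with ⟨c, hc⟩
        have hc1 : 1 ≤ c := by nlinarith
        have hc2 : 2 ≤ c := by
          by_contra hcle
          have : c = 1 := by omega
          subst this; simp at hc; omega
        by_cases hqd : q < d
        · exact hinv q hq2 hqd ⟨c, hc⟩
        · have hqd2 : d ≤ q := by omega
          have hcd : c < d := by nlinarith
          exact hinv c hc2 hcd ⟨q, by rw [hc]; ring⟩
      · rintro ⟨hp2, hpmin, hpdvd⟩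
        by_contra hne
        have hpm : p < m := lt_of_le_of_ne (Int.le_of_dvd (by omega) hpdvd) (by simpa using hne)
        rcases hpdvd with ⟨c, hc⟩
        have hc1 : 1 ≤ c := by nlinarith
        have hc2 : 2 ≤ c := by
          by_contra hcle
          have : c = 1 := by omega
          subst this; simp at hc; omega
        by_cases hpd' : p < d
        · exact hinv p hp2 hpd' ⟨c, hc⟩
        · have hpd2 : d ≤ p := by omega
          have hcd : c < d := by nlinarith
          exact hinv c hc2 hcd ⟨p, by rw [hc]; ring⟩

    · rw [if_neg hm1]
      simp only [List.not_mem_nil, false_iff]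
      rintro ⟨hp2, _, hpdvd⟩
      have := Int.le_of_dvd (by omega) hpdvd
      omega
  · rw [pvFactor, if_neg hgt]
    have hdm : d ≤ m := by nlinarith [mul_self_nonneg (d - 1)]
    by_cases hmod : PySem.Int.mod m d = 0
    · rw [if_pos hmod]
      have hdvd : d ∣ m := Int.dvd_of_emod_eq_zero (by rw [← pv_mod_pos m d (by omega)]; exact hmod)
      obtain ⟨hs1, ⟨j, hj⟩, hnds⟩ := pvStrip_spec m d hd hm
      have hsdvd : pvStrip m d ∣ m := ⟨d ^ j, by linear_combination hj⟩
      have hinv' : ∀ q, 2 ≤ q → q < d + 1 → ¬ q ∣ pvStrip m d := by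
        intro q hq2 hqd hqs
        by_cases h' : q < d
        · exact hinv q hq2 h' (hqs.trans hsdvd)
        · have hq : q = d := by omega
          subst hq; exact hnds hqs
      have ih := pvFactor_mem (pvStrip m d) (d + 1) p hs1 (by omega) hinv'
      simp only [List.mem_cons, ih]
      constructor
      · rintro (rfl | ⟨hp2, hpmin, hps⟩)
        · exact ⟨hd, fun q hq2 hqd hqp => hinv q hq2 hqd (hqp.trans hdvd), hdvd⟩
        · exact ⟨hp2, hpmin, hps.trans hsdvd⟩
      · rintro ⟨hp2, hpmin, hpm⟩
        by_cases hpd : p = d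
        · exact Or.inl hpd
        · refine Or.inr ⟨hp2, hpmin, ?_⟩
          have hprime : Prime p := pv_elem_prime p hp2 hpmin
          rw [hj] at hpm
          rcases (Prime.dvd_mul hprime).mp hpm with hcase | hcase
          · exfalso
            have hpdd : p ∣ d := hprime.dvd_of_dvd_pow hcase
            have : p ≤ d := Int.le_of_dvd (by omega) hpdd
            exact hinv p hp2 (by omega) (hpdd.trans hdvd)
          · exact hcase
    · rw [if_neg hmod]
      have hndm : ¬ d ∣ m := fun hdd =>
        hmod (by rw [pv_mod_pos m d (by omega)]; exact Int.emod_eq_zero_of_dvd hdd)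
      have hinv' : ∀ q, 2 ≤ q → q < d + 1 → ¬ q ∣ m := by
        intro q hq2 hqd hqm
        by_cases h' : q < d
        · exact hinv q hq2 h' hqm
        · have hq : q = d := by omega
          subst hq; exact hndm hqm
      exact pvFactor_mem m (d + 1) p hm (by omega) hinv'
termination_by (m + 2 - d).toNat
decreasing_by
  · have := pvStrip_le m d
    omega
  · omega

-- the central arithmetic fact: some proper dividing period exists iff one of prime cofactor exists
theorem pv_exists_iff (cs : List Char) (n : Nat) (hlen : cs.length = n) (hn : 1 ≤ n) :
    (∃ d : Nat, 1 ≤ d ∧ d < n ∧ d ∣ n ∧ (List.replicate (n / d) (cs.take d)).flatten = cs) ↔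
    (∃ p : Nat, p.Prime ∧ p ∣ n ∧ (List.replicate p (cs.take (n / p))).flatten = cs) := by
  constructor
  · rintro ⟨d, hd1, hdn, hddvd, hrep⟩
    have hmul : d * (n / d) = n := Nat.mul_div_cancel' hddvd
    have hm2 : 2 ≤ n / d := by
      rcases Nat.lt_or_ge (n / d) 2 with h | h
      · nlinarith [hmul]
      · exact h
    have hpprime : (n / d).minFac.Prime := Nat.minFac_prime (by omega)
    set q := (n / d).minFac with hq
    obtain ⟨t, ht⟩ : q ∣ n / d := Nat.minFac_dvd _
    have ht1 : 1 ≤ t := by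
      by_contra h
      have : t = 0 := by omega
      subst this
      omega
    have hcs : cs = (List.replicate (t * q) (cs.take d)).flatten := by
      have h' := hrep.symm
      rw [show n / d = t * q from ht.trans (Nat.mul_comm q t)] at h'
      exact h'
    have hup := pv_period_up cs (cs.take d) t q hpprime.one_lt.le hcs
    have htl : (cs.take d).length = d := by rw [List.length_take]; omega
    rw [htl] at hup
    have hn_eq : n = d * t * q := by rw [← hmul, ht]; ring
    have hnp : n / q = d * t := by rw [hn_eq, Nat.mul_div_cancel _ hpprime.pos]
    refine ⟨q, hpprime, ⟨d * t, by rw [hn_eq]; ring⟩, ?_⟩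
    rw [hnp]
    exact hup.symm
  · rintro ⟨p, hp, hpn, hrep⟩
    have hple : p ≤ n := Nat.le_of_dvd (by omega) hpn
    refine ⟨n / p, ?_, Nat.div_lt_self (by omega) hp.one_lt, Nat.div_dvd_of_dvd hpn, ?_⟩
    · exact (Nat.one_le_div_iff hp.pos).mpr hple
    · rw [Nat.div_div_self hpn (by omega)]
      exact hrep

-- bridging of A's/B's candidate comparison to its Nat form
theorem pv_rep_eq (cs : List Char) (k i : Int) (h1 : 1 ≤ i) (hk0 : 0 ≤ k) :
    PySem.List.pyRepeat (PySem.List.slice cs none (some i)) (PySem.Int.floordiv k i) =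
    (List.replicate (k.toNat / i.toNat) (cs.take i.toNat)).flatten := by
  have hsl := PySem.List.slice_to cs (b := i) (by omega)
  rw [hsl, pv_fdiv_pos k i (by omega)]
  simp only [PySem.List.pyRepeat]
  have h : (k : Int) / i = ((k.toNat / i.toNat : Nat) : Int) := by
    rw [Int.natCast_div k.toNat i.toNat, show ((k.toNat : Nat) : Int) = k by omega,
      show ((i.toNat : Nat) : Int) = i by omega]
  have hq : (k / i).toNat = k.toNat / i.toNat := by rw [h, Int.toNat_natCast]
  rw [hq]

-- same bridging for B's comparison (pattern length k//p, count p)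
theorem pv_rep_eq_B (cs : List Char) (k p : Int) (hp : 1 ≤ p) (hk0 : 0 ≤ k) :
    PySem.List.pyRepeat (PySem.List.slice cs none (some (PySem.Int.floordiv k p))) p =
    (List.replicate p.toNat (cs.take (k.toNat / p.toNat))).flatten := by
  have h : PySem.Int.floordiv k p = ((k.toNat / p.toNat : Nat) : Int) := by
    rw [pv_fdiv_pos k p (by omega), Int.natCast_div k.toNat p.toNat,
      show ((k.toNat : Nat) : Int) = k by omega, show ((p.toNat : Nat) : Int) = p by omega]
  rw [h]
  have hsl := PySem.List.slice_to cs (b := ((k.toNat / p.toNat : Nat) : Int)) (by positivity)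
  rw [hsl]
  simp only [PySem.List.pyRepeat, Int.toNat_natCast]

theorem pv_AB (x k : Int) : is_primitive_pattern x k = is_primitive_pattern_alt x k := by
  simp only [is_primitive_pattern, is_primitive_pattern_alt]
  set cs := (PySem.Str.zfill (PySem.Int.toStr x) k).toList with hcs
  have hlen : cs.length = max (PySem.Int.toStr x).toList.length k.toNat := by
    rw [hcs, PySem.Str.toList_zfill, PySem.Chars.length_zfill]
  have hslen : PySem.Str.len (PySem.Str.zfill (PySem.Int.toStr x) k) = (cs.length : Int) := by
    simp [hcs]
  rw [hslen]
  by_cases hk : (cs.length : Int) = k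
  · rw [if_neg (by simp [hk])]
    by_cases hk1 : 1 ≤ k
    · -- main case
      set n := k.toNat with hn
      have hnlen : cs.length = n := by omega
      have hA : (pvLoopA cs k (PySem.List.pyRange 1 k) = false) ↔
          (∃ d : Nat, 1 ≤ d ∧ d < n ∧ d ∣ n ∧ (List.replicate (n / d) (cs.take d)).flatten = cs) := by
        rw [pv_loopA_false_iff]
        constructor
        · rintro ⟨i, hmem, hmod, hrep⟩
          rw [pv_mem_pyRange_one] at hmem
          obtain ⟨h1i, hik⟩ := hmem
          have hdvdI : i ∣ k := Int.dvd_of_emod_eq_zero (by rw [← pv_mod_pos k i (by omega)]; exact hmod)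
          refine ⟨i.toNat, by omega, by omega, ?_, ?_⟩
          · have h' : ((i.toNat : Nat) : Int) ∣ ((n : Nat) : Int) := by
              rw [show ((i.toNat : Nat) : Int) = i by omega, show ((n : Nat) : Int) = k by omega]
              exact hdvdI
            exact_mod_cast h'
          · rw [pv_rep_eq cs k i (by omega) (by omega)] at hrep
            exact hrep
        · rintro ⟨d, hd1, hdn, hdvd, hrep⟩
          refine ⟨(d : Int), ?_, ?_, ?_⟩
          · rw [pv_mem_pyRange_one]; omega
          · rw [pv_mod_pos k (d : Int) (by omega)]
            apply Int.emod_eq_zero_of_dvd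
            have h' : ((d : Nat) : Int) ∣ ((n : Nat) : Int) := Int.natCast_dvd_natCast.mpr hdvd
            rwa [show ((n : Nat) : Int) = k by omega] at h'
          · rw [pv_rep_eq cs k (d : Int) (by omega) (by omega)]
            simpa using hrep
      have hB : ((pvFactor k 2).all
            (fun p => !(PySem.List.pyRepeat (PySem.List.slice cs none (some (PySem.Int.floordiv k p))) p = cs : Bool)) = false) ↔
          (∃ p : Nat, p.Prime ∧ p ∣ n ∧ (List.replicate p (cs.take (n / p))).flatten = cs) := by
        rw [List.all_eq_false]
        constructor
        · rintro ⟨p, hmem, hf⟩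
          obtain ⟨hp2, hpmin, hpk⟩ :=
            (pvFactor_mem k 2 p (by omega) (by omega) (by intro q hq2 hq; omega)).mp hmem
          have hprime : Prime p := pv_elem_prime p hp2 hpmin
          have hpnat : p.toNat.Prime := by
            have h' := Int.prime_iff_natAbs_prime.mp hprime
            rwa [show p.natAbs = p.toNat by omega] at h'
          have hple : p ≤ k := Int.le_of_dvd (by omega) hpk
          refine ⟨p.toNat, hpnat, ?_, ?_⟩
          · have h' : ((p.toNat : Nat) : Int) ∣ ((n : Nat) : Int) := by
              rw [show ((p.toNat : Nat) : Int) = p by omega, show ((n : Nat) : Int) = k by omega]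
              exact hpk
            exact_mod_cast h'
          · have hrep : PySem.List.pyRepeat (PySem.List.slice cs none (some (PySem.Int.floordiv k p))) p = cs := by
              by_contra hnP
              rw [decide_eq_false hnP] at hf
              simp at hf
            rw [pv_rep_eq_B cs k p (by omega) (by omega)] at hrep
            rw [hn]
            exact hrep
        · rintro ⟨q, hq, hqn, hrep⟩
          refine ⟨(q : Int), ?_, ?_⟩
          · apply (pvFactor_mem k 2 (q : Int) (by omega) (by omega) (by intro r hr2 hr; omega)).mpr
            have hq2 : 2 ≤ (q : Int) := by exact_mod_cast hq.two_le
            refine ⟨hq2, ?_, ?_⟩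
            · exact (pv_elem_iff_nat q).mpr hq |>.2
            · have h' : ((q : Nat) : Int) ∣ ((n : Nat) : Int) := Int.natCast_dvd_natCast.mpr hqn
              rwa [show ((n : Nat) : Int) = k by omega] at h'
          · have hP : PySem.List.pyRepeat (PySem.List.slice cs none (some (PySem.Int.floordiv k (q : Int)))) (q : Int) = cs := by
              rw [pv_rep_eq_B cs k (q : Int) (by exact_mod_cast hq.one_lt.le) (by omega)]
              simpa [← hn] using hrep
            simp [hP]
      have hiff := hA.trans ((pv_exists_iff cs n hnlen (by omega)).trans hB.symm)
      cases hA' : pvLoopA cs k (PySem.List.pyRange 1 k) with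
      | false => exact (hiff.mp hA').symm
      | true =>
        cases hB' : (pvFactor k 2).all
            (fun p => !(PySem.List.pyRepeat (PySem.List.slice cs none (some (PySem.Int.floordiv k p))) p = cs : Bool)) with
        | false => rw [← hA', hiff.mpr hB']
        | true => rfl
    · -- k ≤ 0 but length matches: cs = [], k = 0
      have hk0 : k = 0 := by omega
      subst hk0
      have hcs0 : cs = [] := by
        have : cs.length = 0 := by omega
        simpa using this
      have hr : PySem.List.pyRange 1 0 = [] := by simp [PySem.List.pyRange]
      rw [hr]
      have hf : pvFactor 0 2 = [] := by rw [pvFactor]; norm_num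
      rw [hf]
      simp [pvLoopA]
  · rw [if_pos (by simpa using hk)]
    cases hA' : pvLoopA cs k (PySem.List.pyRange 1 k) with
    | true => rfl
    | false =>
      exfalso
      obtain ⟨i, hmem, hmod, hrep⟩ := (pv_loopA_false_iff cs k (PySem.List.pyRange 1 k)).mp hA'
      rw [pv_mem_pyRange_one] at hmem
      obtain ⟨h1i, hik⟩ := hmem
      have hgt : k.toNat < cs.length := by omega
      rw [pv_rep_eq cs k i (by omega) (by omega)] at hrep
      have hlenr := congrArg List.length hrep
      rw [pv_length_rep, List.length_take] at hlenr
      have hmin : min i.toNat cs.length = i.toNat := by omega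
      rw [hmin] at hlenr
      have hle : k.toNat / i.toNat * i.toNat ≤ k.toNat := Nat.div_mul_le_self _ _
      omega

-- ===== VERDICT (by name: the statement is the Claim_ definition above) =====
theorem is_primitive_pattern_spec : Claim_equal_is_primitive_pattern := by
  intro x k _
  unfold Spec_is_primitive_pattern
  exact pv_AB x k
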